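-- pv_equiv track=rewrite | github.com/Uzy777/Mini-Projects | Scripts/wallhaven-scraper/wallhaven_scraper.py | categories_to_letters
-- ===== SOURCE A (Python) =====
-- def categories_to_letters(val):
--     val = str(val)
--     if len(val) != 3 or any(ch not in "01" for ch in val):
--         return "Not set"
--
--     letters = ""
--     if val[0] == "1":
--         letters += "g"
--     if val[1] == "1":
--         letters += "a"
--     if val[2] == "1":
--         letters += "p"
--
--     return letters if letters else "None enabled"
-- ===== SOURCE B (Python) =====
-- _TABLE = {
--     "000": "None enabled",
--     "001": "p",
--     "010": "a",
--     "011": "ap",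
--     "100": "g",
--     "101": "gp",
--     "110": "ga",
--     "111": "gap",
-- }
--
-- def categories_to_letters(val):
--     return _TABLE.get(str(val), "Not set")
-- ===== Notes on version B (the rewrite author's own statement) =====
-- stated objective: simpler
-- what changed: Replaces the length/character validation plus three bit-test branches and letter concatenation with a single precomputed 8-entry lookup table whose .get default covers every invalid input.
import Mathlib
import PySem

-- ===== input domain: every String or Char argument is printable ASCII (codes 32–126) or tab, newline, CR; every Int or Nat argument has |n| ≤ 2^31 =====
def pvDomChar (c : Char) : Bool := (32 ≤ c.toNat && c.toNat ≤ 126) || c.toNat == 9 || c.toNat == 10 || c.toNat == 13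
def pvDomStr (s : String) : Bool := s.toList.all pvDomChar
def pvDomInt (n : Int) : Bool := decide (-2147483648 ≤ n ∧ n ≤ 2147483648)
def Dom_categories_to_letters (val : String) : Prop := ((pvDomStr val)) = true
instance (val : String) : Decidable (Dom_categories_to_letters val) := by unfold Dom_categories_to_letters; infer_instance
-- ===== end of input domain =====

-- B replaces A's validation + three bit-test branches with one fixed 8-entry table lookup (objective: simpler).

-- ===== PORT A =====
-- val = str(val) is the identity on a String argument.
def categories_to_letters (val : String) : String :=
  let cs := val.toList
  if cs.length ≠ 3 ∨ cs.any (fun ch => !PySem.Chars.isIn [ch] ['0', '1']) then "Not set"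
  else
    -- letters = ""; three '+=' branches in order; val[i] is in range since len = 3
    let letters : List Char := []
    let letters := if PySem.List.pyGetD cs 0 ' ' = '1' then letters ++ ['g'] else letters
    let letters := if PySem.List.pyGetD cs 1 ' ' = '1' then letters ++ ['a'] else letters
    let letters := if PySem.List.pyGetD cs 2 ' ' = '1' then letters ++ ['p'] else letters
    if letters ≠ [] then String.ofList letters else "None enabled"

-- ===== PORT B =====
def pvTable : PySem.Dict String String :=
  PySem.Dict.ofList [("000","None enabled"),("001","p"),("010","a"),("011","ap"),
                     ("100","g"),("101","gp"),("110","ga"),("111","gap")]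

def categories_to_letters_alt (val : String) : String :=
  pvTable.getD val "Not set"

-- ===== PRECONDITION & SPEC =====
def Spec_categories_to_letters (val : String) (out : String) : Prop := out = categories_to_letters_alt val
instance (val : String) (out : String) : Decidable (Spec_categories_to_letters val out) := by unfold Spec_categories_to_letters; infer_instance

-- ===== CLAIM (what is proved, stated in full; the proofs are below) =====
def Claim_equal_categories_to_letters : Prop := ∀ (val : String), Dom_categories_to_letters val → Spec_categories_to_letters val (categories_to_letters val)

-- ===== LEMMAS AND PROOFS =====

-- the table as a literal association list (ofList evaluated once)
theorem pvTable_eq : pvTable = PySem.Dict.mk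
    [("000","None enabled"),("001","p"),("010","a"),("011","ap"),
     ("100","g"),("101","gp"),("110","ga"),("111","gap")] := by decide

-- a character outside {'0','1'} is not 'in "01"' (Python substring test on a 1-char needle)
theorem isIn_single_false (b : Char) (h0 : b ≠ '0') (h1 : b ≠ '1') :
    PySem.Chars.isIn [b] ['0', '1'] = false := by
  rw [Bool.eq_false_iff]
  intro h
  rw [PySem.Chars.isIn_iff_infix] at h
  have hb : b ∈ ['0', '1'] := h.subset (by simp)
  simp at hb
  tauto

-- ===== VERDICT (by name: the statement is the Claim_ definition above) =====
theorem categories_to_letters_spec : Claim_equal_categories_to_letters := by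
  intro val _
  unfold Spec_categories_to_letters
  obtain ⟨cs, rfl⟩ : ∃ cs, val = String.ofList cs := ⟨val.toList, (String.ofList_toList (s := val)).symm⟩
  rw [categories_to_letters_alt, pvTable_eq]
  rcases cs with _ | ⟨a, _ | ⟨b, _ | ⟨c, _ | ⟨d, t⟩⟩⟩⟩ <;>
    simp only [categories_to_letters, String.toList_ofList] <;>
    try (simp [PySem.Dict.getD, PySem.Dict.get?, beq_iff_eq, String.ext_iff,
        show ("000":String).toList = ['0','0','0'] from rfl,
        show ("001":String).toList = ['0','0','1'] from rfl,
        show ("010":String).toList = ['0','1','0'] from rfl,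
        show ("011":String).toList = ['0','1','1'] from rfl,
        show ("100":String).toList = ['1','0','0'] from rfl,
        show ("101":String).toList = ['1','0','1'] from rfl,
        show ("110":String).toList = ['1','1','0'] from rfl,
        show ("111":String).toList = ['1','1','1'] from rfl]; done)
  -- remaining: cs = [a, b, c]
  by_cases ha : a = '0' ∨ a = '1'
  · by_cases hb : b = '0' ∨ b = '1'
    · by_cases hc : c = '0' ∨ c = '1'
      · rcases ha with rfl | rfl <;> rcases hb with rfl | rfl <;> rcases hc with rfl | rfl <;> decide
      · push Not at hc
        have hc0 : ¬ ('0' = c) := fun h => hc.1 h.symm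
        have hc1 : ¬ ('1' = c) := fun h => hc.2 h.symm
        simp [isIn_single_false c hc.1 hc.2, PySem.Dict.getD, PySem.Dict.get?,
          beq_iff_eq, String.ext_iff, hc0, hc1,
          show ("000":String).toList = ['0','0','0'] from rfl,
          show ("001":String).toList = ['0','0','1'] from rfl,
          show ("010":String).toList = ['0','1','0'] from rfl,
          show ("011":String).toList = ['0','1','1'] from rfl,
          show ("100":String).toList = ['1','0','0'] from rfl,
          show ("101":String).toList = ['1','0','1'] from rfl,
          show ("110":String).toList = ['1','1','0'] from rfl,
          show ("111":String).toList = ['1','1','1'] from rfl]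
    · push Not at hb
      have hb0 : ¬ ('0' = b) := fun h => hb.1 h.symm
      have hb1 : ¬ ('1' = b) := fun h => hb.2 h.symm
      simp [isIn_single_false b hb.1 hb.2, PySem.Dict.getD, PySem.Dict.get?,
        beq_iff_eq, String.ext_iff, hb0, hb1,
        show ("000":String).toList = ['0','0','0'] from rfl,
        show ("001":String).toList = ['0','0','1'] from rfl,
        show ("010":String).toList = ['0','1','0'] from rfl,
        show ("011":String).toList = ['0','1','1'] from rfl,
        show ("100":String).toList = ['1','0','0'] from rfl,
        show ("101":String).toList = ['1','0','1'] from rfl,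
        show ("110":String).toList = ['1','1','0'] from rfl,
        show ("111":String).toList = ['1','1','1'] from rfl]
  · push Not at ha
    have ha0 : ¬ ('0' = a) := fun h => ha.1 h.symm
    have ha1 : ¬ ('1' = a) := fun h => ha.2 h.symm
    simp [isIn_single_false a ha.1 ha.2, PySem.Dict.getD, PySem.Dict.get?,
      beq_iff_eq, String.ext_iff, ha0, ha1,
      show ("000":String).toList = ['0','0','0'] from rfl,
      show ("001":String).toList = ['0','0','1'] from rfl,
      show ("010":String).toList = ['0','1','0'] from rfl,
      show ("011":String).toList = ['0','1','1'] from rfl,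
      show ("100":String).toList = ['1','0','0'] from rfl,
      show ("101":String).toList = ['1','0','1'] from rfl,
      show ("110":String).toList = ['1','1','0'] from rfl,
      show ("111":String).toList = ['1','1','1'] from rfl]
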